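-- pv_equiv track=rewrite | github.com/AJ-Devlopers/MediScan-AI | app/modules/module1_extractor/categorizer_ai.py | rule_based_category
-- ===== SOURCE A (Python) =====
-- def rule_based_category(name):
--     name = name.lower()
--
--     if any(k in name for k in ["alt", "ast", "bilirubin", "alp", "ggt", "sgpt", "sgot", "protein", "albumin", "globulin"]):
--         return {"category": "Biochemistry", "subcategory": "Liver Function"}
--
--     elif any(k in name for k in ["creatinine", "urea", "bun", "gfr", "uric acid"]):
--         return {"category": "Biochemistry", "subcategory": "Kidney Function"}
--
--     elif any(k in name for k in ["sodium", "potassium", "chloride", "calcium", "phosphorus"]):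
--         return {"category": "Biochemistry", "subcategory": "Electrolytes"}
--
--     elif any(k in name for k in ["glucose", "hba1c"]):
--         return {"category": "Biochemistry", "subcategory": "Diabetes"}
--
--     elif any(k in name for k in ["cholesterol", "hdl", "ldl", "vldl", "triglyceride"]):
--         return {"category": "Biochemistry", "subcategory": "Lipid Profile"}
--
--     elif any(k in name for k in ["hemoglobin", "rbc", "hematocrit", "mcv", "mch", "mchc", "rdw"]):
--         return {"category": "Hematology", "subcategory": "RBC"}
--
--     elif any(k in name for k in ["leucocyte", "wbc", "neutrophil", "lymphocyte", "monocyte", "eosinophil", "basophil"]):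
--         return {"category": "Hematology", "subcategory": "WBC"}
--
--     elif any(k in name for k in ["platelet", "mpv"]):
--         return {"category": "Hematology", "subcategory": "Platelets"}
--
--     elif any(k in name for k in ["tsh", "t3", "t4", "thyroid"]):
--         return {"category": "Endocrinology", "subcategory": "Thyroid"}
--
--     elif "esr" in name:
--         return {"category": "Hematology", "subcategory": "Inflammation"}
--
--     return None
-- ===== SOURCE B (Python) =====
-- PRIORITY = {
--     "alt": 0, "ast": 0, "bilirubin": 0, "alp": 0, "ggt": 0, "sgpt": 0,
--     "sgot": 0, "protein": 0, "albumin": 0, "globulin": 0,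
--     "creatinine": 1, "urea": 1, "bun": 1, "gfr": 1, "uric acid": 1,
--     "sodium": 2, "potassium": 2, "chloride": 2, "calcium": 2, "phosphorus": 2,
--     "glucose": 3, "hba1c": 3,
--     "cholesterol": 4, "hdl": 4, "ldl": 4, "vldl": 4, "triglyceride": 4,
--     "hemoglobin": 5, "rbc": 5, "hematocrit": 5, "mcv": 5, "mch": 5, "mchc": 5, "rdw": 5,
--     "leucocyte": 6, "wbc": 6, "neutrophil": 6, "lymphocyte": 6, "monocyte": 6,
--     "eosinophil": 6, "basophil": 6,
--     "platelet": 7, "mpv": 7,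
--     "tsh": 8, "t3": 8, "t4": 8, "thyroid": 8,
--     "esr": 9,
-- }
--
-- RESULTS = [
--     {"category": "Biochemistry", "subcategory": "Liver Function"},
--     {"category": "Biochemistry", "subcategory": "Kidney Function"},
--     {"category": "Biochemistry", "subcategory": "Electrolytes"},
--     {"category": "Biochemistry", "subcategory": "Diabetes"},
--     {"category": "Biochemistry", "subcategory": "Lipid Profile"},
--     {"category": "Hematology", "subcategory": "RBC"},
--     {"category": "Hematology", "subcategory": "WBC"},
--     {"category": "Hematology", "subcategory": "Platelets"},
--     {"category": "Endocrinology", "subcategory": "Thyroid"},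
--     {"category": "Hematology", "subcategory": "Inflammation"},
-- ]
--
--
-- def rule_based_category(name):
--     lowered = name.lower()
--     hits = [prio for kw, prio in PRIORITY.items() if kw in lowered]
--     if not hits:
--         return None
--     return dict(RESULTS[min(hits)])
-- ===== Notes on version B (the rewrite author's own statement) =====
-- stated objective: alternative
-- what changed: Replaces the first-match if/elif chain over keyword groups by a flat keyword-to-priority map: B collects the priorities of ALL matching keywords and selects the minimum, which coincides with A's first matching branch.
import Mathlib
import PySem

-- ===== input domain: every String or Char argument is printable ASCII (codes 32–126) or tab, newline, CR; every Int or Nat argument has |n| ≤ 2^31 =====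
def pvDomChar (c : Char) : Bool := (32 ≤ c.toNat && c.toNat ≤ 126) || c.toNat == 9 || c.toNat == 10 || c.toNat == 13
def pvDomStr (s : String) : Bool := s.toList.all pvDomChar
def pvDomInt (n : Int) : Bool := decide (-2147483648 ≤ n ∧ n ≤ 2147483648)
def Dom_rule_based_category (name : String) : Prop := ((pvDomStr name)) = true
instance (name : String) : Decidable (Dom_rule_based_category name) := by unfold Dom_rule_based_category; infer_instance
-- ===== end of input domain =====

-- ===== PORT A =====
-- B replaces A's first-match if/elif chain by a flat keyword→priority map: collect ALL matching
-- priorities, then select the minimum (equal to A's first matching branch); same cost, alternative.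
def rule_based_category (name : String) : Option (List (String × String)) :=
  let n := PySem.Str.lower name
  if ["alt", "ast", "bilirubin", "alp", "ggt", "sgpt", "sgot", "protein", "albumin", "globulin"].any (fun k => PySem.Str.isIn k n) then
    some [("category", "Biochemistry"), ("subcategory", "Liver Function")]
  else if ["creatinine", "urea", "bun", "gfr", "uric acid"].any (fun k => PySem.Str.isIn k n) then
    some [("category", "Biochemistry"), ("subcategory", "Kidney Function")]
  else if ["sodium", "potassium", "chloride", "calcium", "phosphorus"].any (fun k => PySem.Str.isIn k n) then
    some [("category", "Biochemistry"), ("subcategory", "Electrolytes")]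
  else if ["glucose", "hba1c"].any (fun k => PySem.Str.isIn k n) then
    some [("category", "Biochemistry"), ("subcategory", "Diabetes")]
  else if ["cholesterol", "hdl", "ldl", "vldl", "triglyceride"].any (fun k => PySem.Str.isIn k n) then
    some [("category", "Biochemistry"), ("subcategory", "Lipid Profile")]
  else if ["hemoglobin", "rbc", "hematocrit", "mcv", "mch", "mchc", "rdw"].any (fun k => PySem.Str.isIn k n) then
    some [("category", "Hematology"), ("subcategory", "RBC")]
  else if ["leucocyte", "wbc", "neutrophil", "lymphocyte", "monocyte", "eosinophil", "basophil"].any (fun k => PySem.Str.isIn k n) then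
    some [("category", "Hematology"), ("subcategory", "WBC")]
  else if ["platelet", "mpv"].any (fun k => PySem.Str.isIn k n) then
    some [("category", "Hematology"), ("subcategory", "Platelets")]
  else if ["tsh", "t3", "t4", "thyroid"].any (fun k => PySem.Str.isIn k n) then
    some [("category", "Endocrinology"), ("subcategory", "Thyroid")]
  else if PySem.Str.isIn "esr" n then
    some [("category", "Hematology"), ("subcategory", "Inflammation")]
  else
    none

-- ===== PORT B =====
-- flat keyword → priority map (dict literal of Source B, as an association list in insertion order)
def pvPriority : List (String × Nat) :=
  [("alt", 0), ("ast", 0), ("bilirubin", 0), ("alp", 0), ("ggt", 0), ("sgpt", 0),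
   ("sgot", 0), ("protein", 0), ("albumin", 0), ("globulin", 0),
   ("creatinine", 1), ("urea", 1), ("bun", 1), ("gfr", 1), ("uric acid", 1),
   ("sodium", 2), ("potassium", 2), ("chloride", 2), ("calcium", 2), ("phosphorus", 2),
   ("glucose", 3), ("hba1c", 3),
   ("cholesterol", 4), ("hdl", 4), ("ldl", 4), ("vldl", 4), ("triglyceride", 4),
   ("hemoglobin", 5), ("rbc", 5), ("hematocrit", 5), ("mcv", 5), ("mch", 5), ("mchc", 5), ("rdw", 5),
   ("leucocyte", 6), ("wbc", 6), ("neutrophil", 6), ("lymphocyte", 6), ("monocyte", 6),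
   ("eosinophil", 6), ("basophil", 6),
   ("platelet", 7), ("mpv", 7),
   ("tsh", 8), ("t3", 8), ("t4", 8), ("thyroid", 8),
   ("esr", 9)]

def pvResults : List (List (String × String)) :=
  [[("category", "Biochemistry"), ("subcategory", "Liver Function")],
   [("category", "Biochemistry"), ("subcategory", "Kidney Function")],
   [("category", "Biochemistry"), ("subcategory", "Electrolytes")],
   [("category", "Biochemistry"), ("subcategory", "Diabetes")],
   [("category", "Biochemistry"), ("subcategory", "Lipid Profile")],
   [("category", "Hematology"), ("subcategory", "RBC")],
   [("category", "Hematology"), ("subcategory", "WBC")],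
   [("category", "Hematology"), ("subcategory", "Platelets")],
   [("category", "Endocrinology"), ("subcategory", "Thyroid")],
   [("category", "Hematology"), ("subcategory", "Inflammation")]]

def rule_based_category_alt (name : String) : Option (List (String × String)) :=
  -- hits = the priorities of all keywords contained in name.lower(); answer = RESULTS[min(hits)]
  if ((pvPriority.filter (fun p => PySem.Str.isIn p.1 (PySem.Str.lower name))).map (fun p => p.2)).isEmpty then none
  else
    match PySem.List.min? ((pvPriority.filter (fun p => PySem.Str.isIn p.1 (PySem.Str.lower name))).map (fun p => p.2)) (fun x => x) with
    | none => none   -- unreachable: guarded by the non-emptiness test (Python min raises on [])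
    | some g => some (pvResults.getD g [])

-- ===== PRECONDITION & SPEC =====
def Spec_rule_based_category (name : String) (out : Option (List (String × String))) : Prop := out = rule_based_category_alt name
instance (name : String) (out : Option (List (String × String))) : Decidable (Spec_rule_based_category name out) := by unfold Spec_rule_based_category; infer_instance

-- ===== CLAIM (what is proved, stated in full; the proofs are below) =====
def Claim_equal_rule_based_category : Prop := ∀ (name : String), Dom_rule_based_category name → Spec_rule_based_category name (rule_based_category name)

-- ===== LEMMAS AND PROOFS =====

-- the ten keyword groups in branch order (proof-side view of pvPriority)
def pvGroups : List (List String) :=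
  [["alt", "ast", "bilirubin", "alp", "ggt", "sgpt", "sgot", "protein", "albumin", "globulin"],
   ["creatinine", "urea", "bun", "gfr", "uric acid"],
   ["sodium", "potassium", "chloride", "calcium", "phosphorus"],
   ["glucose", "hba1c"],
   ["cholesterol", "hdl", "ldl", "vldl", "triglyceride"],
   ["hemoglobin", "rbc", "hematocrit", "mcv", "mch", "mchc", "rdw"],
   ["leucocyte", "wbc", "neutrophil", "lymphocyte", "monocyte", "eosinophil", "basophil"],
   ["platelet", "mpv"],
   ["tsh", "t3", "t4", "thyroid"],
   ["esr"]]

-- tag every keyword of block j with priority i + j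
def pvCat (i : Nat) : List (List String) → List (String × Nat)
  | [] => []
  | b :: bs => b.map (fun k => (k, i)) ++ pvCat (i + 1) bs

-- the priorities B's comprehension collects, block by block
def pvHits (P : String → Bool) (i : Nat) : List (List String) → List Nat
  | [] => []
  | b :: bs => (b.filter P).map (fun _ => i) ++ pvHits P (i + 1) bs

-- index of the first block with a matching keyword (A's chain, abstractly)
def pvFirst (P : String → Bool) (i : Nat) : List (List String) → Option Nat
  | [] => none
  | b :: bs => if b.any P then some i else pvFirst P (i + 1) bs

lemma pvPriority_eq_cat : pvPriority = pvCat 0 pvGroups := by rfl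

lemma pv_filtmap_cat (s : String) :
    ∀ (bs : List (List String)) (i : Nat),
      ((pvCat i bs).filter (fun p => PySem.Str.isIn p.1 s)).map (fun p => p.2)
        = pvHits (fun k => PySem.Str.isIn k s) i bs := by
  intro bs
  induction bs with
  | nil => intro i; rfl
  | cons b bs ih =>
      intro i
      simp only [pvCat, pvHits, List.filter_append, List.map_append, List.filter_map,
            List.map_map, Function.comp_def, ih]

lemma pv_le_of_mem_pvHits (P : String → Bool) :
    ∀ (bs : List (List String)) (i x : Nat), x ∈ pvHits P i bs → i ≤ x := by
  intro bs
  induction bs with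
  | nil => intro i x hx; simp [pvHits] at hx
  | cons b bs ih =>
      intro i x hx
      simp only [pvHits, List.mem_append, List.mem_map] at hx
      rcases hx with ⟨_, _, rfl⟩ | hx
      · exact le_refl i
      · exact Nat.le_of_succ_le (ih (i + 1) x hx)

lemma pv_min?_const_append (i : Nat) (a rest : List Nat)
    (ha : ∀ x ∈ a, x = i) (hge : ∀ x ∈ rest, i ≤ x) (hne : a ≠ []) :
    PySem.List.min? (a ++ rest) (fun x => x) = some i := by
  cases hm : PySem.List.min? (a ++ rest) (fun x => x) with
  | none =>
      rw [PySem.List.min?_eq_none_iff] at hm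
      exact absurd (List.append_eq_nil_iff.mp hm).1 hne
  | some m =>
      have hmem := PySem.List.min?_mem hm
      have hmin := PySem.List.min?_isMin hm
      obtain ⟨x, hx⟩ := List.exists_mem_of_ne_nil a hne
      have hxi : x = i := ha x hx
      have hmi : m ≤ i := by
        have := hmin x (List.mem_append_left _ hx)
        simpa [hxi] using this
      rcases List.mem_append.mp hmem with h | h
      · rw [ha m h]
      · have : i ≤ m := hge m h
        congr 1
        omega

lemma pv_min?_pvHits (P : String → Bool) :
    ∀ (bs : List (List String)) (i : Nat),
      PySem.List.min? (pvHits P i bs) (fun x => x) = pvFirst P i bs := by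
  intro bs
  induction bs with
  | nil => intro i; rfl
  | cons b bs ih =>
      intro i
      by_cases h : b.any P
      · have hne : (b.filter P).map (fun _ => i) ≠ [] := by
          simp only [ne_eq, List.map_eq_nil_iff, List.filter_eq_nil_iff]
          intro hall
          rcases List.any_eq_true.mp h with ⟨x, hx, hpx⟩
          exact absurd hpx (by simpa using hall x hx)
        rw [pvHits, pvFirst, if_pos h]
        exact pv_min?_const_append i _ _
          (by intro x hx; rcases List.mem_map.mp hx with ⟨_, _, rfl⟩; rfl)
          (by intro x hx; exact Nat.le_of_succ_le (pv_le_of_mem_pvHits P bs (i + 1) x hx))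
          hne
      · have hnil : b.filter P = [] := by
          rw [List.filter_eq_nil_iff]
          intro x hx hpx
          exact h (List.any_eq_true.mpr ⟨x, hx, hpx⟩)
        rw [pvHits, pvFirst, if_neg h, hnil]
        simpa using ih (i + 1)

-- B's port, rewritten through pvFirst
lemma pv_alt_eq (name : String) :
    rule_based_category_alt name =
      (match pvFirst (fun k => PySem.Str.isIn k (PySem.Str.lower name)) 0 pvGroups with
       | none => none
       | some g => some (pvResults.getD g [])) := by
  unfold rule_based_category_alt
  rw [pvPriority_eq_cat, pv_filtmap_cat (PySem.Str.lower name), pv_min?_pvHits]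
  cases hf : pvFirst (fun k => PySem.Str.isIn k (PySem.Str.lower name)) 0 pvGroups with
  | none =>
      have hnil : pvHits (fun k => PySem.Str.isIn k (PySem.Str.lower name)) 0 pvGroups = [] := by
        have h := pv_min?_pvHits (fun k => PySem.Str.isIn k (PySem.Str.lower name)) pvGroups 0
        rw [hf] at h
        exact (PySem.List.min?_eq_none_iff _ _).mp h
      rw [hnil]
      rfl
  | some g =>
      have hne : pvHits (fun k => PySem.Str.isIn k (PySem.Str.lower name)) 0 pvGroups ≠ [] := by
        intro hnil
        have h := pv_min?_pvHits (fun k => PySem.Str.isIn k (PySem.Str.lower name)) pvGroups 0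
        rw [hnil, hf] at h
        rw [(PySem.List.min?_eq_none_iff _ _).mpr rfl] at h
        simp at h
      rw [if_neg (by simpa [List.isEmpty_iff] using hne : ¬ ((pvHits (fun k => PySem.Str.isIn k (PySem.Str.lower name)) 0 pvGroups).isEmpty = true))]

-- A ten-way first-match chain equals selection through its first-true index (pure Boolean fact)
lemma pv_chain (c0 c1 c2 c3 c4 c5 c6 c7 c8 c9 : Bool)
    (r0 r1 r2 r3 r4 r5 r6 r7 r8 r9 : List (String × String)) :
    (if c0 then some r0 else if c1 then some r1 else if c2 then some r2 else
     if c3 then some r3 else if c4 then some r4 else if c5 then some r5 else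
     if c6 then some r6 else if c7 then some r7 else if c8 then some r8 else
     if c9 then some r9 else none)
    = (match (if c0 then some (0 : Nat) else if c1 then some 1 else if c2 then some 2 else
              if c3 then some 3 else if c4 then some 4 else if c5 then some 5 else
              if c6 then some 6 else if c7 then some 7 else if c8 then some 8 else
              if c9 then some 9 else none) with
       | none => none
       | some g => some ([r0, r1, r2, r3, r4, r5, r6, r7, r8, r9].getD g [])) := by
  cases c0 <;> cases c1 <;> cases c2 <;> cases c3 <;> cases c4 <;>
    cases c5 <;> cases c6 <;> cases c7 <;> cases c8 <;> cases c9 <;> rfl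

-- ===== VERDICT (by name: the statement is the Claim_ definition above) =====
theorem rule_based_category_spec : Claim_equal_rule_based_category := by
  intro name _
  unfold Spec_rule_based_category
  rw [pv_alt_eq]
  unfold rule_based_category
  simp only [pvFirst, pvGroups, List.any_cons, List.any_nil, Bool.or_false]
  exact pv_chain _ _ _ _ _ _ _ _ _ _ _ _ _ _ _ _ _ _ _ _
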